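-- pv_equiv track=rewrite | github.com/BertilleT/classificrops | src/scripts_Classificrops/view_stats.py | create_keys
-- ===== SOURCE A (Python) =====
-- from collections import defaultdict
--
-- def create_keys(my_array):
--     my_keys = defaultdict(list)
--     for i in my_array:
--         my_keys[i[0:3]].append(i)
--     doublons=[]
--     for k,l in my_keys.items():
--         if len(l) > 1:
--             doublons.append(k)
--         my_keys[k] = l[0]
--     for k in doublons:
--         del my_keys[k]
--     return my_keys
-- ===== SOURCE B (Python) =====
-- from collections import defaultdict, Counter
--
-- def create_keys(my_array):
--     counts = Counter(i[0:3] for i in my_array)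
--     res = defaultdict(list)
--     for i in my_array:
--         if counts[i[0:3]] == 1:
--             res[i[0:3]] = i
--     return res
-- ===== Notes on version B (the rewrite author's own statement) =====
-- stated objective: simpler
-- what changed: Replaces A's group-into-lists dict plus a doublons-collection pass and a deletion pass by a Counter of the 3-char prefixes followed by one pass over the input that inserts an item only when its prefix occurs exactly once.
import Mathlib
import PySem

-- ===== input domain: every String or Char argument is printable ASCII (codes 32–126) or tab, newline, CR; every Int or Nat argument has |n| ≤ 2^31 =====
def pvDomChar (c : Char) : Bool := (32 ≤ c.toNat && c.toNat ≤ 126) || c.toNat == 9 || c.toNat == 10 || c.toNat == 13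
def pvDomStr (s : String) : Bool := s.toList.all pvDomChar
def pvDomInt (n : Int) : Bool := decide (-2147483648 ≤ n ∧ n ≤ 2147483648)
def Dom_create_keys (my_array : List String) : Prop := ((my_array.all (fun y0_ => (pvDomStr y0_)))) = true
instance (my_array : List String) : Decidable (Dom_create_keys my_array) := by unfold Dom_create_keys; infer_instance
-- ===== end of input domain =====

-- B replaces A's group-into-lists / collect-doublons / delete passes by: count the 3-char prefixes
-- (a Counter), then one pass inserting an item exactly when its prefix occurs once (simpler; same cost).

-- i[0:3] (both Pythons compute it)
def pvPre (i : String) : String := PySem.Str.slice i (some 0) (some 3)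

-- ===== PORT A =====
def create_keys (my_array : List String) : List (String × String) :=
  -- my_keys[i[0:3]].append(i) over a defaultdict(list)
  let my_keys : PySem.Dict String (List String) :=
    my_array.foldl (fun d i => d.modify (pvPre i) [] (fun l => l ++ [i])) PySem.Dict.empty
  -- one loop over items(): collect doublons and re-assign my_keys[k] = l[0]
  -- (the value type changes list→str, so the re-assigned dict is rebuilt with the same keys in the same
  --  order; l[0] is ported as pyGetD — every group is nonempty, so it never hits the default)
  let st := my_keys.items.foldl
      (fun (st : List String × PySem.Dict String String) p =>
        (if p.2.length > 1 then st.1 ++ [p.1] else st.1,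
         st.2.insert p.1 (PySem.List.pyGetD p.2 0 "")))
      ([], PySem.Dict.empty)
  -- for k in doublons: del my_keys[k]
  (st.1.foldl (fun d k => d.erase k) st.2).items

-- ===== PORT B =====
def create_keys_alt (my_array : List String) : List (String × String) :=
  -- counts = Counter(i[0:3] for i in my_array)
  let counts : PySem.Dict String Int := PySem.Dict.counter (my_array.map pvPre)
  -- res[i[0:3]] = i for i in my_array if counts[i[0:3]] == 1
  (my_array.foldl
      (fun (res : PySem.Dict String String) i =>
        if counts.getD (pvPre i) 0 == 1 then res.insert (pvPre i) i else res)
      PySem.Dict.empty).items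

-- ===== PRECONDITION & SPEC =====
def Spec_create_keys (my_array : List String) (out : List (String × String)) : Prop := out = create_keys_alt my_array
instance (my_array : List String) (out : List (String × String)) : Decidable (Spec_create_keys my_array out) := by unfold Spec_create_keys; infer_instance

-- ===== CLAIM (what is proved, stated in full; the proofs are below) =====
def Claim_equal_create_keys : Prop := ∀ (my_array : List String), Dom_create_keys my_array → Spec_create_keys my_array (create_keys my_array)

-- ===== LEMMAS AND PROOFS =====

-- the distinct prefixes of xs, in first-appearance order
def pvKeys (xs : List String) : List String := PySem.Set.ofList (xs.map pvPre)
-- the group of items of xs whose prefix is k, in order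
def pvGrp (xs : List String) (k : String) : List String := xs.filter (fun i => pvPre i == k)

theorem pvGrp_ne_nil_of_mem {xs : List String} {k : String} (h : k ∈ xs.map pvPre) :
    pvGrp xs k ≠ [] := by
  obtain ⟨i, hi, rfl⟩ := List.mem_map.mp h
  intro hnil
  have : i ∈ pvGrp xs (pvPre i) := List.mem_filter.mpr ⟨hi, by simp⟩
  simp [hnil] at this

theorem pyGetD_zero_eq_headD (l : List String) : PySem.List.pyGetD l 0 "" = l.headD "" := by
  cases l <;> simp [PySem.List.pyGetD, PySem.List.pyGet?, PySem.List.pyIdx?]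

-- A's grouping dict: keys, lookups and items
theorem a_keys (xs : List String) :
    (xs.foldl (fun d i => d.modify (pvPre i) [] (fun l => l ++ [i])) PySem.Dict.empty).keys
      = pvKeys xs := by
  have h := PySem.Dict.keys_foldl_modify_key xs pvPre [] (fun _ i l => l ++ [i]) PySem.Dict.empty
  simpa [pvKeys, PySem.Set.update_nil_left, PySem.Dict.keys, PySem.Dict.empty] using h

theorem a_nodup (xs : List String) :
    (xs.foldl (fun d i => d.modify (pvPre i) [] (fun l => l ++ [i])) PySem.Dict.empty).keys.Nodup := by
  exact PySem.Dict.nodup_keys_foldl_modify_key xs pvPre [] (fun _ i l => l ++ [i])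
    PySem.Dict.empty (by simp [PySem.Dict.keys, PySem.Dict.empty])

theorem a_getD (xs : List String) (k : String) :
    (xs.foldl (fun d i => d.modify (pvPre i) [] (fun l => l ++ [i])) PySem.Dict.empty).getD k []
      = pvGrp xs k := by
  have h : xs.foldl (fun d i => d.modify (pvPre i) [] (fun l => l ++ [i])) PySem.Dict.empty
      = (xs.map (fun i => (pvPre i, i))).foldl
          (fun d p => d.modify p.1 [] (fun l => l ++ [p.2])) PySem.Dict.empty := by
    rw [List.foldl_map]
  rw [h, PySem.Dict.getD_foldl_modify_append]
  simp [pvGrp, List.filter_map, Function.comp_def, List.map_map, PySem.Dict.getD_empty]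

theorem a_groups (xs : List String) :
    (xs.foldl (fun d i => d.modify (pvPre i) [] (fun l => l ++ [i])) PySem.Dict.empty).items
      = (pvKeys xs).map (fun k => (k, pvGrp xs k)) := by
  rw [PySem.Dict.items_eq_map_keys _ (a_nodup xs) [], a_keys]
  exact List.map_congr_left (fun k _ => by rw [a_getD])

-- erasing a list of keys is filtering the items
theorem items_foldl_erase (ks : List String) (d : PySem.Dict String String) :
    (ks.foldl (fun d k => d.erase k) d).items
      = d.items.filter (fun p => !(ks.contains p.1)) := by
  induction ks generalizing d with
  | nil => simp
  | cons k t ih =>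
      simp only [List.foldl_cons, ih]
      have he : (d.erase k).items = d.items.filter (fun p => !(p.1 == k)) := rfl
      rw [he, List.filter_filter]
      apply List.filter_congr
      intro p _
      simp only [List.contains_cons, Bool.not_or, Bool.and_comm]

-- characterisation of A's result
theorem a_char (xs : List String) :
    create_keys xs
      = ((pvKeys xs).filter (fun k => !(decide (1 < (pvGrp xs k).length)))).map
          (fun k => (k, (pvGrp xs k).headD "")) := by
  unfold create_keys
  dsimp only
  rw [a_groups,
    PySem.List.foldl_prod_mk
      (fun (s : List String) (e : String × List String) => if e.2.length > 1 then s ++ [e.1] else s)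
      (fun (s : PySem.Dict String String) (e : String × List String) =>
        s.insert e.1 (PySem.List.pyGetD e.2 0 ""))
      ((pvKeys xs).map (fun k => (k, pvGrp xs k))) [] PySem.Dict.empty]
  rw [items_foldl_erase]
  -- doublons
  have hd := PySem.List.foldl_append_if
      (fun e : String × List String => decide (e.2.length > 1)) Prod.fst
      ((pvKeys xs).map (fun k => (k, pvGrp xs k))) []
  simp only [decide_eq_true_eq] at hd
  rw [hd, List.filter_map]
  -- the rebuilt dict
  rw [PySem.Dict.items_foldl_insert_fresh _ Prod.fst
        (fun e : String × List String => PySem.List.pyGetD e.2 0 "") PySem.Dict.empty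
        (fun a _ => by simp [PySem.Dict.contains_empty])
        (by simp [List.map_map, Function.comp_def, pvKeys])]
  simp only [PySem.Dict.empty, List.nil_append, List.map_map, Function.comp_def, List.filter_map]
  have hfil : List.filter
        (fun x =>
          !(List.map (fun x => x) (List.filter (fun x => decide ((pvGrp xs x).length > 1)) (pvKeys xs))).contains x)
        (pvKeys xs)
      = List.filter (fun k => !decide (1 < (pvGrp xs k).length)) (pvKeys xs) := by
    apply List.filter_congr
    intro k hk
    simp only [List.map_id']
    rw [Bool.eq_iff_iff]
    simp [List.mem_filter, hk]
  rw [hfil]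
  exact List.map_congr_left (fun k _ => by rw [pyGetD_zero_eq_headD])

theorem pvKeys_append (ys : List String) (x : String) :
    pvKeys (ys ++ [x]) = PySem.Set.add (pvKeys ys) (pvPre x) := by
  simp [pvKeys, PySem.Set.ofList_append_singleton]

theorem pvGrp_append (ys : List String) (x : String) (k : String) :
    pvGrp (ys ++ [x]) k = pvGrp ys k ++ (if pvPre x == k then [x] else []) := by
  rw [pvGrp, pvGrp, List.filter_append]
  congr 1
  cases h : pvPre x == k <;> simp [List.filter, h]

-- the count of a prefix is the length of its group
theorem count_eq_grp_length (xs : List String) (k : String) :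
    (xs.map pvPre).count k = (pvGrp xs k).length := by
  rw [pvGrp, ← List.countP_eq_length_filter, List.count_eq_countP', List.countP_map]
  rfl

-- a filtered unique-key pass lists the unique groups in first-appearance order
theorem uniq_pass (q : String → Bool) (ys : List String)
    (hq : ∀ k, q k = true → (pvGrp ys k).length ≤ 1) :
    (ys.filter (fun i => q (pvPre i))).map (fun i => (pvPre i, i))
      = ((pvKeys ys).filter q).map (fun k => (k, (pvGrp ys k).headD "")) := by
  induction ys using List.reverseRecOn with
  | nil => simp [pvKeys]
  | append_singleton zs x ih =>
      have hmono : ∀ k, q k = true → (pvGrp zs k).length ≤ 1 := by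
        intro k hk
        have hle : (pvGrp zs k).length ≤ (pvGrp (zs ++ [x]) k).length := by
          rw [pvGrp_append, List.length_append]; omega
        exact le_trans hle (hq k hk)
      have ihz := ih hmono
      rw [List.filter_append, List.map_append, ihz, pvKeys_append]
      by_cases hqx : q (pvPre x) = true
      · -- x survives: its group in zs must be empty, so its key is fresh
        have h1 := hq (pvPre x) hqx
        rw [pvGrp_append] at h1
        simp only [beq_self_eq_true, if_true, List.length_append, List.length_cons,
          List.length_nil] at h1
        have hgz : pvGrp zs (pvPre x) = [] := by
          cases h : pvGrp zs (pvPre x) with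
          | nil => rfl
          | cons a t => rw [h] at h1; simp at h1
        have hnm : pvPre x ∉ zs.map pvPre := fun h => pvGrp_ne_nil_of_mem h hgz
        have hnk : pvPre x ∉ pvKeys zs := by simpa [pvKeys, PySem.Set.mem_ofList] using hnm
        rw [PySem.Set.add_of_not_mem hnk, List.filter_append, List.map_append]
        congr 1
        · apply List.map_congr_left
          intro k hk
          have hkmem : k ∈ pvKeys zs := (List.mem_filter.mp hk).1
          have hne : (pvPre x == k) = false := by
            simp only [beq_eq_false_iff_ne, ne_eq]
            intro h; exact hnk (h ▸ hkmem)
          rw [pvGrp_append, hne]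
          simp
        · simp only [hqx, List.filter, List.map]
          rw [pvGrp_append, hgz]
          simp
      · have hqxf : q (pvPre x) = false := by cases h : q (pvPre x); rfl; exact absurd h hqx
        simp only [List.filter, hqxf, List.map_nil, List.append_nil]
        by_cases hmem : pvPre x ∈ pvKeys zs
        · rw [PySem.Set.add_of_mem hmem]
          apply List.map_congr_left
          intro k hk
          obtain ⟨hkm, hkq⟩ := List.mem_filter.mp hk
          have hne : (pvPre x == k) = false := by
            simp only [beq_eq_false_iff_ne, ne_eq]
            intro h; subst h; rw [hqxf] at hkq; exact Bool.false_ne_true hkq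
          rw [pvGrp_append, hne]
          simp
        · rw [PySem.Set.add_of_not_mem hmem, List.filter_append]
          simp only [List.filter_cons, hqxf, Bool.false_eq_true, if_false, List.filter_nil,
            List.append_nil]
          apply List.map_congr_left
          intro k hk
          have hkmem : k ∈ pvKeys zs := (List.mem_filter.mp hk).1
          have hne : (pvPre x == k) = false := by
            simp only [beq_eq_false_iff_ne, ne_eq]
            intro h; exact hmem (h ▸ hkmem)
          rw [pvGrp_append, hne]
          simp

-- the two filter predicates agree on pvKeys (every group there is nonempty)
theorem filters_agree (xs : List String) :
    (pvKeys xs).filter (fun k => decide ((pvGrp xs k).length = 1))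
      = (pvKeys xs).filter (fun k => !(decide (1 < (pvGrp xs k).length))) := by
  apply List.filter_congr
  intro k hk
  have hne : pvGrp xs k ≠ [] :=
    pvGrp_ne_nil_of_mem (by simpa [pvKeys, PySem.Set.mem_ofList] using hk)
  have h1 : 1 ≤ (pvGrp xs k).length := by
    cases h : pvGrp xs k with
    | nil => exact absurd h hne
    | cons a t => simp
  rw [Bool.eq_iff_iff]
  simp only [decide_eq_true_eq, Bool.not_eq_true', decide_eq_false_iff_not, not_lt]
  omega

-- characterisation of B's result
theorem b_char (xs : List String) :
    create_keys_alt xs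
      = ((pvKeys xs).filter (fun k => !(decide (1 < (pvGrp xs k).length)))).map
          (fun k => (k, (pvGrp xs k).headD "")) := by
  unfold create_keys_alt
  dsimp only
  -- the test counts[i[0:3]] == 1 is "group of pvPre i has length 1"
  have htest : ∀ i : String,
      ((PySem.Dict.counter (xs.map pvPre)).getD (pvPre i) 0 == 1)
        = decide ((pvGrp xs (pvPre i)).length = 1) := by
    intro i
    rw [PySem.Dict.getD_counter, count_eq_grp_length, Bool.eq_iff_iff]
    simp only [beq_iff_eq, decide_eq_true_eq]
    omega
  have hfun : (fun (res : PySem.Dict String String) (i : String) =>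
        if (PySem.Dict.counter (xs.map pvPre)).getD (pvPre i) 0 == 1
        then res.insert (pvPre i) i else res)
      = (fun (res : PySem.Dict String String) (i : String) =>
        if decide ((pvGrp xs (pvPre i)).length = 1) = true
        then res.insert (pvPre i) i else res) := by
    funext res i
    rw [htest i]
  rw [hfun, PySem.List.foldl_if_eq_foldl_filter]
  -- the surviving keys are distinct (each occurs exactly once in xs.map pvPre)
  have hnodup : ((xs.filter (fun i => decide ((pvGrp xs (pvPre i)).length = 1))).map pvPre).Nodup := by
    rw [List.nodup_iff_count_le_one]
    intro k
    by_cases hm : k ∈ (xs.filter (fun i => decide ((pvGrp xs (pvPre i)).length = 1))).map pvPre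
    · obtain ⟨i, hi, rfl⟩ := List.mem_map.mp hm
      have hq : (pvGrp xs (pvPre i)).length = 1 := by
        have := (List.mem_filter.mp hi).2
        simpa using this
      have hsub : List.Sublist
          ((xs.filter (fun i => decide ((pvGrp xs (pvPre i)).length = 1))).map pvPre)
          (xs.map pvPre) := List.Sublist.map pvPre List.filter_sublist
      calc ((xs.filter (fun i => decide ((pvGrp xs (pvPre i)).length = 1))).map pvPre).count (pvPre i)
          ≤ (xs.map pvPre).count (pvPre i) := hsub.count_le _
        _ = 1 := by rw [count_eq_grp_length, hq]
    · rw [List.count_eq_zero_of_not_mem hm]; omega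
  rw [PySem.Dict.items_foldl_insert_fresh _ pvPre (fun i => i) PySem.Dict.empty
        (fun a _ => by simp [PySem.Dict.contains_empty]) hnodup]
  simp only [PySem.Dict.empty, List.nil_append]
  rw [uniq_pass (fun k => decide ((pvGrp xs k).length = 1)) xs
        (fun k hk => by simpa using le_of_eq (of_decide_eq_true hk))]
  rw [filters_agree]

-- ===== VERDICT (by name: the statement is the Claim_ definition above) =====
theorem create_keys_spec : Claim_equal_create_keys := by
  intro xs _
  unfold Spec_create_keys
  rw [a_char, b_char]
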